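-- pv_equiv track=rewrite | github.com/Euchiz/VCF-to-seq | phen2gene_predict.py | resolve_column_indices
-- ===== SOURCE A (Python) =====
-- from typing import Dict, Iterable, List, Sequence, Tuple
--
-- HPO_ALIASES = {"hpo_id", "hpo", "hp", "hpo_term", "term", "phenotype"}
--
-- GENE_ALIASES = {"gene", "gene_symbol", "symbol", "gene_name"}
--
-- WEIGHT_ALIASES = {"weight", "score", "beta", "term_gene_weight", "h2g_score"}
--
-- def normalize(text: str) -> str:
--     return text.strip().lower()
--
-- def resolve_column_indices(fieldnames: Sequence[str]) -> Tuple[int, int, int | None]: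
--     hpo_idx = gene_idx = weight_idx = None
--     for idx, name in enumerate(fieldnames):
--         key = normalize(name)
--         if key in HPO_ALIASES and hpo_idx is None:
--             hpo_idx = idx
--         elif key in GENE_ALIASES and gene_idx is None:
--             gene_idx = idx
--         elif key in WEIGHT_ALIASES and weight_idx is None:
--             weight_idx = idx
--
--     if hpo_idx is None or gene_idx is None:
--         raise ValueError(
--             "Annotation DB must include header columns for HPO term and gene "
--             "(e.g., hpo_id, gene, weight)."
--         )
--
--     return hpo_idx, gene_idx, weight_idx
-- ===== SOURCE B (Python) =====
-- HPO_ALIASES = {"hpo_id", "hpo", "hp", "hpo_term", "term", "phenotype"}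
-- GENE_ALIASES = {"gene", "gene_symbol", "symbol", "gene_name"}
-- WEIGHT_ALIASES = {"weight", "score", "beta", "term_gene_weight", "h2g_score"}
--
-- def normalize(text: str) -> str:
--     return text.strip().lower()
--
-- def resolve_column_indices(fieldnames):
--     index_of = {}
--     for idx, name in enumerate(fieldnames):
--         index_of.setdefault(normalize(name), idx)
--
--     def first_for(aliases):
--         hits = [index_of[a] for a in aliases if a in index_of]
--         return min(hits) if hits else None
--
--     hpo_idx = first_for(HPO_ALIASES)
--     gene_idx = first_for(GENE_ALIASES)
--     weight_idx = first_for(WEIGHT_ALIASES)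
--
--     if hpo_idx is None or gene_idx is None:
--         raise ValueError(
--             "Annotation DB must include header columns for HPO term and gene "
--             "(e.g., hpo_id, gene, weight)."
--         )
--
--     return hpo_idx, gene_idx, weight_idx
-- ===== Notes on version B (the rewrite author's own statement) =====
-- stated objective: idiomatic
-- what changed: A single branch-laden scan with elif state is replaced by building a first-occurrence index table (setdefault over one enumerate pass) and then resolving each category independently as the minimum table index over its aliases.
import Mathlib
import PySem

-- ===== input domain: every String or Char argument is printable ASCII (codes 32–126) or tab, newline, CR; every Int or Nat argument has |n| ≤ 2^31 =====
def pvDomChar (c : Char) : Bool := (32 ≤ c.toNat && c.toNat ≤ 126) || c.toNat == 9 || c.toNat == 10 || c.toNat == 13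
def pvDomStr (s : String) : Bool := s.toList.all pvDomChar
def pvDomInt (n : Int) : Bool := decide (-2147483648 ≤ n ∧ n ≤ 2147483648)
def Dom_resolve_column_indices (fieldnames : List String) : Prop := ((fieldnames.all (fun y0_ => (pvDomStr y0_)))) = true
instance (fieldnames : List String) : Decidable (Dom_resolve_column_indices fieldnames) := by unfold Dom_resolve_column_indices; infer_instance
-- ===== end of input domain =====

-- B replaces A's single elif-state scan by a first-occurrence index table plus a per-category
-- minimum over aliases (idiomatic; same cost). Equivalence is about the return value; where A
-- raises ValueError (no HPO or no gene column) both raise, excluded by Pre_.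

-- ===== PORT A =====
def pvNormalize (s : String) : String := PySem.Str.lower (PySem.Str.strip s)

def pvHPO : List String := ["hpo_id", "hpo", "hp", "hpo_term", "term", "phenotype"]
def pvGENE : List String := ["gene", "gene_symbol", "symbol", "gene_name"]
def pvWEIGHT : List String := ["weight", "score", "beta", "term_gene_weight", "h2g_score"]

-- the for-loop of A: state (hpo_idx, gene_idx, weight_idx)
def pvStepA (s : Option Int × Option Int × Option Int) (p : Int × String) :
    Option Int × Option Int × Option Int :=
  let key := pvNormalize p.2
  if key ∈ pvHPO ∧ s.1 = none then (some p.1, s.2.1, s.2.2)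
  else if key ∈ pvGENE ∧ s.2.1 = none then (s.1, some p.1, s.2.2)
  else if key ∈ pvWEIGHT ∧ s.2.2 = none then (s.1, s.2.1, some p.1)
  else s

def resolve_column_indices (fieldnames : List String) : Int × Int × Option Int :=
  let s := (PySem.List.enumerate fieldnames 0).foldl pvStepA (none, none, none)
  match s.1, s.2.1 with
  | some h, some g => (h, g, s.2.2)
  | _, _ => (0, 0, none)  -- Python raises ValueError here; excluded by Pre_

-- ===== PORT B =====
-- (B re-declares the module constants/helpers so the two ports share no definitions)
def altNormalize (s : String) : String := PySem.Str.lower (PySem.Str.strip s)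
def altHPO : List String := ["hpo_id", "hpo", "hp", "hpo_term", "term", "phenotype"]
def altGENE : List String := ["gene", "gene_symbol", "symbol", "gene_name"]
def altWEIGHT : List String := ["weight", "score", "beta", "term_gene_weight", "h2g_score"]
-- index_of: normalized header name -> index of its first occurrence (dict.setdefault)
def pvIndexOf (fieldnames : List String) : PySem.Dict String Int :=
  (PySem.List.enumerate fieldnames 0).foldl
    (fun d p => d.setdefault (altNormalize p.2) p.1) PySem.Dict.empty

def pvFirstFor (index_of : PySem.Dict String Int) (aliases : List String) : Option Int :=
  let hits := aliases.filterMap (fun a => index_of.get? a)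
  PySem.List.min? hits (fun x => x)

def resolve_column_indices_alt (fieldnames : List String) : Int × Int × Option Int :=
  let index_of := pvIndexOf fieldnames
  let hpo := pvFirstFor index_of altHPO
  let gene := pvFirstFor index_of altGENE
  let weight := pvFirstFor index_of altWEIGHT
  match hpo with
  | none => (0, 0, none)  -- Python raises ValueError here; excluded by Pre_
  | some h =>
    match gene with
    | none => (0, 0, none)  -- ValueError; excluded by Pre_
    | some g => (h, g, weight)

-- ===== PRECONDITION & SPEC =====
-- Pre_ excludes exactly the inputs on which A (and B) raise ValueError: no header normalizes
-- to an HPO alias, or none to a gene alias.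
-- (Pre_ re-states normalization and the alias sets so its closure reaches neither port)
def preNormalize (s : String) : String := PySem.Str.lower (PySem.Str.strip s)
def preHPO : List String := ["hpo_id", "hpo", "hp", "hpo_term", "term", "phenotype"]
def preGENE : List String := ["gene", "gene_symbol", "symbol", "gene_name"]
def Pre_resolve_column_indices (fieldnames : List String) : Prop :=
  (∃ s ∈ fieldnames, preNormalize s ∈ preHPO) ∧ (∃ s ∈ fieldnames, preNormalize s ∈ preGENE)
instance (fieldnames : List String) : Decidable (Pre_resolve_column_indices fieldnames) := by
  unfold Pre_resolve_column_indices; infer_instance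

def pvWitness_resolve_column_indices : List String := ["HPO_ID", "gene", "weight"]

def Spec_resolve_column_indices (fieldnames : List String) (out : Int × Int × Option Int) : Prop :=
  out = resolve_column_indices_alt fieldnames
instance (fieldnames : List String) (out : Int × Int × Option Int) :
    Decidable (Spec_resolve_column_indices fieldnames out) := by
  unfold Spec_resolve_column_indices; infer_instance

-- ===== CLAIM (what is proved, stated in full; the proofs are below) =====
def Claim_equal_resolve_column_indices : Prop :=
  ∀ (fieldnames : List String), Dom_resolve_column_indices fieldnames →
    Pre_resolve_column_indices fieldnames →
    Spec_resolve_column_indices fieldnames (resolve_column_indices fieldnames)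

-- ===== LEMMAS AND PROOFS =====

-- the re-declared B-side / Pre_-side helpers are definitionally the A-side ones
lemma pvAltNorm : altNormalize = pvNormalize := rfl
lemma pvPreNorm : preNormalize = pvNormalize := rfl
lemma pvAltHPO : altHPO = pvHPO := rfl
lemma pvAltGENE : altGENE = pvGENE := rfl
lemma pvAltWEIGHT : altWEIGHT = pvWEIGHT := rfl
lemma pvPreHPO : preHPO = pvHPO := rfl
lemma pvPreGENE : preGENE = pvGENE := rfl

-- first index (counting from i) whose normalized name lies in S
def pvFIdx (S : List String) : List String → Int → Option Int
  | [], _ => none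
  | x :: xs, i => if pvNormalize x ∈ S then some i else pvFIdx S xs (i + 1)

-- first index (counting from i) whose normalized name equals k
def pvFEq (k : String) : List String → Int → Option Int
  | [], _ => none
  | x :: xs, i => if pvNormalize x = k then some i else pvFEq k xs (i + 1)

-- the three alias sets are pairwise disjoint
lemma pv_hpo_not_gene (k : String) (h : k ∈ pvHPO) : k ∉ pvGENE := by
  fin_cases h <;> decide
lemma pv_hpo_not_weight (k : String) (h : k ∈ pvHPO) : k ∉ pvWEIGHT := by
  fin_cases h <;> decide
lemma pv_gene_not_weight (k : String) (h : k ∈ pvGENE) : k ∉ pvWEIGHT := by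
  fin_cases h <;> decide

-- A's loop computes, componentwise, the first index whose key lies in the respective set
lemma pvLoopA_eq (xs : List String) : ∀ (i : Int) (h g w : Option Int),
    (PySem.List.enumerate xs i).foldl pvStepA (h, g, w) =
      (h.or (pvFIdx pvHPO xs i), g.or (pvFIdx pvGENE xs i), w.or (pvFIdx pvWEIGHT xs i)) := by
  induction xs with
  | nil => intro i h g w; simp [PySem.List.enumerate_nil, pvFIdx]
  | cons x xs ih =>
    intro i h g w
    rw [PySem.List.enumerate_cons]
    simp only [List.foldl_cons]
    by_cases hH : pvNormalize x ∈ pvHPO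
    · have hG := pv_hpo_not_gene _ hH
      have hW := pv_hpo_not_weight _ hH
      cases h with
      | none => simp [pvStepA, hH, hG, hW, ih, pvFIdx]
      | some v => simp [pvStepA, hH, hG, hW, ih, pvFIdx]
    · by_cases hG : pvNormalize x ∈ pvGENE
      · have hW := pv_gene_not_weight _ hG
        cases g with
        | none => simp [pvStepA, hH, hG, hW, ih, pvFIdx]
        | some v => simp [pvStepA, hH, hG, hW, ih, pvFIdx]
      · by_cases hW : pvNormalize x ∈ pvWEIGHT
        · cases w with
          | none => simp [pvStepA, hH, hG, hW, ih, pvFIdx]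
          | some v => simp [pvStepA, hH, hG, hW, ih, pvFIdx]
        · simp [pvStepA, hH, hG, hW, ih, pvFIdx]

-- B's dict lookup: first occurrence index of a key
lemma pvIndexOf_get? (xs : List String) : ∀ (i : Int) (d : PySem.Dict String Int) (k : String),
    ((PySem.List.enumerate xs i).foldl
      (fun d p => d.setdefault (pvNormalize p.2) p.1) d).get? k = (d.get? k).or (pvFEq k xs i) := by
  induction xs with
  | nil => intro i d k; simp [PySem.List.enumerate_nil, pvFEq]
  | cons x xs ih =>
    intro i d k
    rw [PySem.List.enumerate_cons]
    simp only [List.foldl_cons]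
    rw [ih]
    by_cases hc : d.contains (pvNormalize x)
    · rw [PySem.Dict.setdefault_of_contains d i hc]
      rcases eq_or_ne (pvNormalize x) k with rfl | hne
      · have : (d.get? (pvNormalize x)).isSome := by
          rw [← PySem.Dict.contains_eq_isSome_get? d]; exact hc
        rcases Option.isSome_iff_exists.1 this with ⟨v, hv⟩
        simp [pvFEq, hv]
      · simp [pvFEq, hne]
    · rw [PySem.Dict.setdefault_of_not_contains d i (by simpa using hc)]
      have hnone : d.get? (pvNormalize x) = none := by
        rcases hn : d.get? (pvNormalize x) with _ | v
        · rfl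
        · exfalso; apply hc; rw [PySem.Dict.contains_eq_isSome_get? d, hn]; rfl
      rcases eq_or_ne (pvNormalize x) k with rfl | hne
      · rw [PySem.Dict.get?_insert_self d (pvNormalize x) i]
        simp [pvFEq, hnone]
      · rw [PySem.Dict.get?_insert_of_ne d i (Ne.symm hne)]
        simp [pvFEq, hne]

lemma pvFEq_ge (k : String) (xs : List String) : ∀ (i v : Int), pvFEq k xs i = some v → i ≤ v := by
  induction xs with
  | nil => intro i v h; simp [pvFEq] at h
  | cons x xs ih =>
    intro i v h
    by_cases hx : pvNormalize x = k
    · simp [pvFEq, hx] at h; omega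
    · simp [pvFEq, hx] at h; have := ih (i + 1) v h; omega

-- minimum over aliases of first-occurrence indices = first index whose key is in the set
lemma pvMin_eq (S : List String) (xs : List String) : ∀ (i : Int),
    PySem.List.min? (S.filterMap (fun a => pvFEq a xs i)) (fun x => x) = pvFIdx S xs i := by
  induction xs with
  | nil =>
    intro i
    have : S.filterMap (fun a => pvFEq a ([] : List String) i) = [] := by
      simp [pvFEq]
    simp [this, pvFIdx, PySem.List.min?]
  | cons x xs ih =>
    intro i
    by_cases hx : pvNormalize x ∈ S
    · -- every hit is either i (for the alias pvNormalize x) or ≥ i+1; i itself is a hit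
      set hits := S.filterMap (fun a => pvFEq a (x :: xs) i) with hhits
      have hmem : (i : Int) ∈ hits := by
        rw [hhits, List.mem_filterMap]
        exact ⟨pvNormalize x, hx, by simp [pvFEq]⟩
      have hlb : ∀ v ∈ hits, i ≤ v := by
        intro v hv
        rw [hhits, List.mem_filterMap] at hv
        rcases hv with ⟨a, _, ha⟩
        by_cases hax : pvNormalize x = a
        · simp [pvFEq, hax] at ha; omega
        · simp [pvFEq, hax] at ha
          have := pvFEq_ge a xs (i + 1) v ha; omega
      have hne : hits ≠ [] := fun h => by simp [h] at hmem
      rcases hm : PySem.List.min? hits (fun x => x) with _ | m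
      · exact absurd ((PySem.List.min?_eq_none_iff hits (fun x => x)).1 hm) hne
      · have h1 : m ∈ hits := PySem.List.min?_mem hm
        have h2 : m ≤ i := PySem.List.min?_isMin hm i hmem
        have h3 : i ≤ m := hlb m h1
        have : m = i := le_antisymm h2 h3
        simp [pvFIdx, hx, this]
    · have hsame : S.filterMap (fun a => pvFEq a (x :: xs) i) =
          S.filterMap (fun a => pvFEq a xs (i + 1)) := by
        apply List.filterMap_congr
        intro a ha
        have : pvNormalize x ≠ a := fun h => hx (h ▸ ha)
        simp [pvFEq, this]
      rw [hsame, ih, pvFIdx]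
      simp [hx]

-- pvFIdx is none exactly when no header normalizes into S
lemma pvFIdx_none_iff (S : List String) (xs : List String) : ∀ (i : Int),
    pvFIdx S xs i = none ↔ ¬ ∃ s ∈ xs, pvNormalize s ∈ S := by
  induction xs with
  | nil => intro i; simp [pvFIdx]
  | cons x xs ih =>
    intro i
    by_cases hx : pvNormalize x ∈ S
    · simp [pvFIdx, hx]
    · simp [pvFIdx, hx, ih (i + 1)]

lemma pvFirstFor_eq (fieldnames : List String) (S : List String) :
    pvFirstFor (pvIndexOf fieldnames) S = pvFIdx S fieldnames 0 := by
  unfold pvFirstFor pvIndexOf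
  simp only [pvAltNorm]
  have : S.filterMap (fun a =>
      ((PySem.List.enumerate fieldnames 0).foldl
        (fun d p => d.setdefault (pvNormalize p.2) p.1) PySem.Dict.empty).get? a) =
      S.filterMap (fun a => pvFEq a fieldnames 0) := by
    apply List.filterMap_congr
    intro a _
    rw [pvIndexOf_get? fieldnames 0 PySem.Dict.empty a]
    simp [PySem.Dict.get?_empty]
  simp only [this]
  exact pvMin_eq S fieldnames 0

-- ===== VERDICT (by name: the statement is the Claim_ definition above) =====
theorem resolve_column_indices_spec : Claim_equal_resolve_column_indices := by
  intro fieldnames _ hpre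
  unfold Spec_resolve_column_indices resolve_column_indices resolve_column_indices_alt
  simp only [pvLoopA_eq fieldnames 0 none none none, pvFirstFor_eq, pvAltHPO, pvAltGENE, pvAltWEIGHT]
  simp only [pvPreNorm, pvPreHPO, pvPreGENE, Pre_resolve_column_indices] at hpre
  rcases hpre with ⟨hH, hG⟩
  rcases hh : pvFIdx pvHPO fieldnames 0 with _ | h
  · exact absurd ((pvFIdx_none_iff pvHPO fieldnames 0).1 hh) (by exact fun hc => hc hH)
  rcases hg : pvFIdx pvGENE fieldnames 0 with _ | g
  · exact absurd ((pvFIdx_none_iff pvGENE fieldnames 0).1 hg) (by exact fun hc => hc hG)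
  simp
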